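-- pv_equiv track=rewrite | github.com/dmoore0/MPMPSolutions | CoinPuzzle(5).py | rotateCW
-- ===== SOURCE A (Python) =====
-- def rotateCW(puzzle):
--     rotated = list()
--     for i in range(len(puzzle) - 1, -1, -1):
--         row = list()
--         for j in range(len(puzzle) - 1, i - 1, -1):
--             row.append(puzzle[j][j - i])
--         rotated.append(row)
--     return rotated
-- ===== SOURCE B (Python) =====
-- def rotateCW(puzzle):
--     # Structural recursion: peel off the last source row; it becomes the first
--     # column of the result, prepended onto the rotation of the smaller triangle.
--     if not puzzle:
--         return []
--     sub = rotateCW(puzzle[:-1])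
--     last = puzzle[-1]
--     return [[last[0]]] + [[last[r + 1]] + sub[r] for r in range(len(sub))]
-- ===== Notes on version B (the rewrite author's own statement) =====
-- stated objective: alternative
-- what changed: Replaces A's nested countdown index-gather loops with structural recursion: peel off the last source row, which becomes the first column prepended onto the clockwise rotation of the remaining smaller triangle.
import Mathlib
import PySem

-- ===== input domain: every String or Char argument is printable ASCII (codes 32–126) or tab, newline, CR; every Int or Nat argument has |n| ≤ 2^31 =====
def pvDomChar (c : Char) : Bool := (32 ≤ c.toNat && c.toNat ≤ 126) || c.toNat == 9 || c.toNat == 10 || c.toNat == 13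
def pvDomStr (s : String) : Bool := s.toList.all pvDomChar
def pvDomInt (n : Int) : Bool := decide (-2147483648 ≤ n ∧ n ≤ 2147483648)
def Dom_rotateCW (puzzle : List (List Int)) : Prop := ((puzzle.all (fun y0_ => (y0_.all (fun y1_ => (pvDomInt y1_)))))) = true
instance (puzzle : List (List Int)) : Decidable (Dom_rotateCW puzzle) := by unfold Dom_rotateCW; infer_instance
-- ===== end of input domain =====

-- B rebuilds the rotation by structural recursion (peel the last source row, prepend it as the
-- first column of the recursive result) instead of A's double index-gather loop; objective: alternative.

-- ===== PORT A =====
-- literal port of A's nested countdown loops; indexing via pyGetD (Pre_ keeps every index in range)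
def rotateCW (puzzle : List (List Int)) : List (List Int) :=
  (PySem.List.pyRange ((puzzle.length : Int) - 1) (-1) (-1)).foldl
    (fun rotated i =>
      rotated ++ [(PySem.List.pyRange ((puzzle.length : Int) - 1) (i - 1) (-1)).foldl
        (fun row j => row ++ [PySem.List.pyGetD (PySem.List.pyGetD puzzle j []) (j - i) 0]) []])
    []

-- ===== PORT B =====
-- literal port of Source B: recursion on puzzle[:-1], last row becomes the first column
def rotateCW_alt (puzzle : List (List Int)) : List (List Int) :=
  if h : puzzle = [] then []
  else
    let sub := rotateCW_alt (PySem.List.slice puzzle none (some (-1)))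
    let last := PySem.List.pyGetD puzzle (-1) []
    [[PySem.List.pyGetD last 0 0]] ++
      (List.range sub.length).map
        (fun (r : Nat) => [PySem.List.pyGetD last ((r : Int) + 1) 0] ++ sub.getD r [])
termination_by puzzle.length
decreasing_by
  simp [PySem.List.slice_to_neg_one]
  exact List.length_pos_iff.mpr h

-- ===== PRECONDITION & SPEC =====
-- Pre_ excludes exactly the ragged inputs on which Python A raises IndexError
-- (some row j shorter than j+1 cells); both Pythons raise there.
def Pre_rotateCW (puzzle : List (List Int)) : Prop :=
  ∀ j ∈ List.range puzzle.length, j < (puzzle.getD j []).length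
instance (puzzle : List (List Int)) : Decidable (Pre_rotateCW puzzle) := by
  unfold Pre_rotateCW; infer_instance
def pvWitness_rotateCW : List (List Int) := [[1], [2, 3], [4, 5, 6]]

def Spec_rotateCW (puzzle : List (List Int)) (out : List (List Int)) : Prop := out = rotateCW_alt puzzle
instance (puzzle : List (List Int)) (out : List (List Int)) : Decidable (Spec_rotateCW puzzle out) := by unfold Spec_rotateCW; infer_instance

-- ===== CLAIM (what is proved, stated in full; the proofs are below) =====
def Claim_equal_rotateCW : Prop := ∀ (puzzle : List (List Int)), Dom_rotateCW puzzle → Pre_rotateCW puzzle → Spec_rotateCW puzzle (rotateCW puzzle)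

-- ===== LEMMAS AND PROOFS =====

-- closed form both ports are proved equal to: row k, entry m is puzzle[n-1-m][k-m]
def pvG (puzzle : List (List Int)) : List (List Int) :=
  (List.range puzzle.length).map (fun (k : Nat) =>
    (List.range (k + 1)).map (fun (m : Nat) =>
      PySem.List.pyGetD (PySem.List.pyGetD puzzle ((puzzle.length : Int) - 1 - (m : Int)) []) ((k : Int) - (m : Int)) 0))

theorem pv_foldl_append_map {α β : Type} (g : α → β) (l : List α) (init : List β) :
    l.foldl (fun acc x => acc ++ [g x]) init = init ++ l.map g := by
  induction l generalizing init <;> simp [*]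

theorem pvGetD_append_left (xs : List (List Int)) (t : List Int) (i : Int)
    (h0 : 0 ≤ i) (h1 : i < (xs.length : Int)) :
    PySem.List.pyGetD (xs ++ [t]) i [] = PySem.List.pyGetD xs i [] := by
  obtain ⟨k, rfl⟩ : ∃ k : Nat, i = (k : Int) := ⟨i.toNat, by omega⟩
  simp only [PySem.List.pyGetD_natCast, List.getD_eq_getElem?_getD]
  rw [List.getElem?_append_left (by exact_mod_cast h1)]

theorem pvA_eq (puzzle : List (List Int)) : rotateCW puzzle = pvG puzzle := by
  unfold rotateCW pvG
  rw [pv_foldl_append_map, PySem.List.pyRange_neg_one]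
  have hn : (((puzzle.length : Int) - 1) - (-1)).toNat = puzzle.length := by omega
  rw [hn, List.map_map, List.nil_append]
  refine List.map_congr_left ?_
  intro k hk
  simp only [Function.comp_apply]
  rw [pv_foldl_append_map, PySem.List.pyRange_neg_one, List.nil_append]
  have h2 : (((puzzle.length : Int) - 1) - ((((puzzle.length : Int) - 1) - (k : Int)) - 1)).toNat
      = k + 1 := by omega
  rw [h2, List.map_map]
  refine List.map_congr_left ?_
  intro m hm
  simp only [Function.comp_apply]
  congr 1
  ring

theorem pv_entry_head (xs : List (List Int)) (t : List Int) (i j j' : Int)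
    (hi : i = (xs.length : Int)) (hj : j' = j) :
    PySem.List.pyGetD (PySem.List.pyGetD (xs ++ [t]) i []) j' 0 = PySem.List.pyGetD t j 0 := by
  subst hi hj
  have h : PySem.List.pyGetD (xs ++ [t]) (xs.length : Int) [] = t := by
    simp only [PySem.List.pyGetD_natCast, List.getD_eq_getElem?_getD]
    simp
  rw [h]

theorem pv_entry_tail (xs : List (List Int)) (t : List Int) (i i' j j' : Int)
    (hi : i' = i) (hj : j' = j) (h0 : 0 ≤ i) (h1 : i < (xs.length : Int)) :
    PySem.List.pyGetD (PySem.List.pyGetD (xs ++ [t]) i' []) j' 0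
      = PySem.List.pyGetD (PySem.List.pyGetD xs i []) j 0 := by
  subst hi hj
  rw [pvGetD_append_left _ _ _ h0 h1]

theorem pvB_eq (puzzle : List (List Int)) : rotateCW_alt puzzle = pvG puzzle := by
  induction puzzle using List.reverseRecOn with
  | nil => rw [rotateCW_alt]; simp [pvG]
  | append_singleton xs t ih =>
    rw [rotateCW_alt, dif_neg (by simp)]
    have hlen : (pvG xs).length = xs.length := by simp [pvG]
    simp only [PySem.List.slice_to_neg_one, List.dropLast_concat, ih,
      PySem.List.pyGetD_neg_one_append_singleton, hlen]
    conv_rhs => rw [pvG]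
    rw [List.length_append, List.length_singleton, List.range_succ_eq_map]
    rw [List.map_cons, List.map_map, List.singleton_append]
    congr 1
    · -- first output row is [t[0]]
      simp only [zero_add, List.range_one, List.map_cons, List.map_nil]
      refine congrArg (fun x => [x]) ?_
      exact (pv_entry_head xs t _ _ _ (by push_cast; ring) (by push_cast <;> ring)).symm
    · refine List.map_congr_left ?_
      intro r hr
      have hrn : r < xs.length := List.mem_range.mp hr
      simp only [Function.comp_apply, Nat.succ_eq_add_one]
      rw [List.getD_eq_getElem (pvG xs) [] (by rw [hlen]; exact hrn)]
      have hrow : (pvG xs)[r]'(by rw [hlen]; exact hrn) = (List.range (r + 1)).map (fun (m : Nat) =>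
          PySem.List.pyGetD (PySem.List.pyGetD xs ((xs.length : Int) - 1 - (m : Int)) []) ((r : Int) - (m : Int)) 0) := by
        simp [pvG]
      rw [hrow]
      conv_rhs => rw [List.range_succ_eq_map, List.map_cons, List.map_map]
      rw [List.singleton_append]
      congr 1
      · exact (pv_entry_head xs t _ _ _ (by push_cast; ring) (by push_cast <;> ring)).symm
      · refine (List.map_congr_left ?_).symm
        intro m hm
        have hmr : m < r + 1 := List.mem_range.mp hm
        simp only [Function.comp_apply, Nat.succ_eq_add_one]
        exact pv_entry_tail xs t ((xs.length : Int) - 1 - (m : Int)) _ ((r : Int) - (m : Int)) _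
          (by push_cast <;> ring) (by push_cast <;> ring) (by omega) (by omega)

-- ===== VERDICT (by name: the statement is the Claim_ definition above) =====
theorem rotateCW_spec : Claim_equal_rotateCW := by
  intro puzzle _ _
  unfold Spec_rotateCW
  rw [pvA_eq, pvB_eq]
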